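-- pv_equiv track=rewrite | github.com/MaraTat/epitopepredict | epitopepredict/utilities.py | reorderFilenames
-- ===== SOURCE A (Python) =====
-- def reorderFilenames(files, order):
--     """reorder filenames by another list order(seqs)"""
--     new = []
--     for i in order:
--         found=False
--         for f in files:
--             if i in f:
--                 new.append(f)
--                 found=True
--         if found==False:
--             new.append('')
--     return new
-- ===== SOURCE B (Python) =====
-- def reorderFilenames(files, order):
--     """reorder filenames by another list order(seqs)"""
--     # one pass over files, bucketing each file under every order index it matches;
--     # then a pass over the buckets, '' standing in for an empty bucket
--     buckets = [[] for _ in order]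
--     for f in files:
--         for idx, i in enumerate(order):
--             if i in f:
--                 buckets[idx].append(f)
--     new = []
--     for b in buckets:
--         new.extend(b if b else [''])
--     return new
-- ===== Notes on version B (the rewrite author's own statement) =====
-- stated objective: alternative
-- what changed: B swaps the loop nesting and the data structure: a single pass over files distributes each file into per-order-index buckets (a list of lists), and a second staged pass flattens the buckets, emitting '' for an empty bucket, instead of A's per-order-item rescans of files with a found flag.
import Mathlib
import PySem

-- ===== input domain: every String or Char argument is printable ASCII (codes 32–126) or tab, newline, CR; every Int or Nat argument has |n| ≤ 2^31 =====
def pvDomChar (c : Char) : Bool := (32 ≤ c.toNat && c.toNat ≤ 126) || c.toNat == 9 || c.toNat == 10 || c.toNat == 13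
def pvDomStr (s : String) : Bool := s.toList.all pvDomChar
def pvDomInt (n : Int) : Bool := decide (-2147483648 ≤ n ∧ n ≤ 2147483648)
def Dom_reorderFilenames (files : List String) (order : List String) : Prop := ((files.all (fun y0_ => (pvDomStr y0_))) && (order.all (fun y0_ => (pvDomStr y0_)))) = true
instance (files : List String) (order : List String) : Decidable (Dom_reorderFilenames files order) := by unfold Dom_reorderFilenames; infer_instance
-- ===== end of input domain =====

-- B swaps the loop nesting: one pass over files distributes each file into per-order-index buckets, then a second pass flattens them ('' for an empty bucket); same return value as A.


-- ===== PORT A =====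
def reorderFilenames (files : List String) (order : List String) : List String :=
  order.foldl (fun new i =>
    let p := files.foldl (fun (p : List String × Bool) f =>
        if PySem.Str.isIn i f then (p.1 ++ [f], true) else p) (new, false)
    if p.2 == false then p.1 ++ [""] else p.1) []

-- ===== PORT B =====
-- the update of the index-keyed buckets for one file f (buckets[idx].append(f) when order[idx] in f)
def reorderFilenames_alt (files : List String) (order : List String) : List String :=
  let buckets := files.foldl
    (fun bs f => (order.zip bs).map (fun p => if PySem.Str.isIn p.1 f then p.2 ++ [f] else p.2))
    (order.map (fun _ => ([] : List String)))
  buckets.foldl (fun new b => new ++ (if b.isEmpty then [""] else b)) []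

-- ===== PRECONDITION & SPEC =====
def Spec_reorderFilenames (files : List String) (order : List String) (out : List String) : Prop := out = reorderFilenames_alt files order
instance (files : List String) (order : List String) (out : List String) : Decidable (Spec_reorderFilenames files order out) := by unfold Spec_reorderFilenames; infer_instance

-- ===== CLAIM (what is proved, stated in full; the proofs are below) =====
def Claim_equal_reorderFilenames : Prop := ∀ (files : List String) (order : List String), Dom_reorderFilenames files order → Spec_reorderFilenames files order (reorderFilenames files order)

-- ===== LEMMAS AND PROOFS =====
-- the bucket both programs produce for one order item
def pvF (files : List String) (i : String) : List String :=
  let m := files.filter (fun f => PySem.Str.isIn i f)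
  if m.isEmpty then [""] else m

-- A's inner loop over files computes (acc ++ matching files, found ∨ any match)
lemma inner_inv (files : List String) (i : String) (acc : List String) (b : Bool) :
    files.foldl (fun (p : List String × Bool) f =>
        if PySem.Str.isIn i f then (p.1 ++ [f], true) else p) (acc, b)
    = (acc ++ files.filter (fun f => PySem.Str.isIn i f),
       b || !(files.filter (fun f => PySem.Str.isIn i f)).isEmpty) := by
  induction files generalizing acc b with
  | nil => simp
  | cons f fs ih =>
    simp only [List.foldl_cons, List.filter_cons]
    by_cases h : PySem.Str.isIn i f = true
    · rw [if_pos h, if_pos h, ih]; simp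
    · rw [if_neg h, if_neg h, ih]

-- A's fold equals the canonical per-order-item fold
lemma a_canon (files order : List String) :
    reorderFilenames files order = order.foldl (fun new i => new ++ pvF files i) [] := by
  unfold reorderFilenames
  apply PySem.List.foldl_congr_mem
  intro new i _
  rw [inner_inv]
  unfold pvF
  by_cases h : (files.filter (fun f => PySem.Str.isIn i f)).isEmpty = true
  · rw [List.isEmpty_iff] at h; rw [h]; simp
  · rw [Bool.not_eq_true] at h; rw [h]; simp
    intro hc
    exfalso
    have e : List.filter (fun f => PySem.Str.isIn i f) files = [] :=
      List.filter_eq_nil_iff.mpr (fun a ha => by simp [hc a ha])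
    rw [e] at h
    simp at h

-- zipping a list with a pointwise image of itself and mapping is a single map
lemma zip_map_self {α β γ : Type} (l : List α) (g : α → β) (h : α × β → γ) :
    ((l.zip (l.map g)).map h) = l.map (fun i => h (i, g i)) := by
  induction l with
  | nil => rfl
  | cons a t ih => simp [List.zip_cons_cons, ih]

-- B's bucket-building pass: each bucket accumulates exactly the files its order item matches
lemma buckets_inv (files order : List String) (g : String → List String) :
    files.foldl
      (fun bs f => (order.zip bs).map (fun p => if PySem.Str.isIn p.1 f then p.2 ++ [f] else p.2))
      (order.map g)
    = order.map (fun i => g i ++ files.filter (fun f => PySem.Str.isIn i f)) := by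
  induction files generalizing g with
  | nil => simp
  | cons f fs ih =>
    simp only [List.foldl_cons]
    rw [zip_map_self order g (fun p => if PySem.Str.isIn p.1 f then p.2 ++ [f] else p.2)]
    have : (order.map (fun i => if PySem.Str.isIn i f then g i ++ [f] else g i))
         = order.map (fun i => (fun j => if PySem.Str.isIn j f then g j ++ [f] else g j) i) := rfl
    rw [this, ih (fun j => if PySem.Str.isIn j f then g j ++ [f] else g j)]
    apply List.map_congr_left
    intro i _
    by_cases h : PySem.Chars.isIn i.toList f.toList = true <;> simp [h]

-- ===== VERDICT (by name: the statement is the Claim_ definition above) =====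
theorem reorderFilenames_spec : Claim_equal_reorderFilenames := by
  intro files order _
  unfold Spec_reorderFilenames
  rw [a_canon]
  unfold reorderFilenames_alt
  rw [buckets_inv files order (fun _ => []), List.foldl_map]
  apply PySem.List.foldl_congr_mem
  intro new i _
  simp [pvF]
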